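-- pv_equiv track=rewrite | github.com/joshuachang2311/HANCOC | chord_notation_generator.py | generate_root_alter
-- ===== SOURCE A (Python) =====
-- def array_rotate(array, shift_right):
--     array_size = len(array)
--     new_array = []
--
--     for i in range(0, array_size):
--         new_array.append(0)
--
--     for i in range(0, array_size):
--         current_index = (i + shift_right) % array_size
--         new_array[current_index] = array[i]
--
--     return new_array
--
-- def generate_root_alter(fifths_transpose):
--     root_alter = [0, 0, 0, 0, 0, 0, 0]
--     if(fifths_transpose > 0):
--         for sharp_number in range(0, fifths_transpose):
--             sharp_index = (sharp_number * 4 + 3) % 7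
--             root_alter[sharp_index] = 1
--     if(fifths_transpose < 0):
--         for flat_number in range(0, fifths_transpose * -1):
--             flat_index = (flat_number * 3 + 6) % 7
--             root_alter[flat_index] = -1
--
--     root_alter = array_rotate(root_alter, (fifths_transpose * -4) % 7)
--
--     return root_alter
-- ===== SOURCE B (Python) =====
-- def generate_root_alter(fifths_transpose):
--     result = [0, 0, 0, 0, 0, 0, 0]
--     if fifths_transpose > 0:
--         for k in range(fifths_transpose):
--             result[(k * 3 + 6) % 7] = 1
--     if fifths_transpose < 0:
--         for k in range(-fifths_transpose):
--             result[(k * 4 + 3) % 7] = -1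
--     return result
-- ===== Notes on version B (the rewrite author's own statement) =====
-- stated objective: simpler
-- what changed: B drops the array_rotate helper and the second whole-array pass: the rotation is folded into the build loop's index arithmetic, so the final array is produced in a single pass.
import Mathlib
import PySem

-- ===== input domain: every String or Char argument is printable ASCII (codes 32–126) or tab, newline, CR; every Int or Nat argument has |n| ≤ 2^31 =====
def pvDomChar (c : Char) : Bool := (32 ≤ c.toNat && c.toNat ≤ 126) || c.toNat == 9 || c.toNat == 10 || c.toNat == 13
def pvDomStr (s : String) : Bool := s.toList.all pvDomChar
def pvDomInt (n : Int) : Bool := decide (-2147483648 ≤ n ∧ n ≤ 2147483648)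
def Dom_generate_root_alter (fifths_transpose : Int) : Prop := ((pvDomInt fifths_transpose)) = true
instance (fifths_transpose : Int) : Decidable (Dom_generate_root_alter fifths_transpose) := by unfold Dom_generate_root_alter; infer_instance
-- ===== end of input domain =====

-- B fuses A's separate whole-array rotation pass into the index formula of the build loop
-- (objective: simpler — one pass, no array_rotate helper).

-- ===== PORT A =====
-- array[i] is always in range here; pyGetD with default 0 is exact for i ∈ [0, len).
def array_rotate (array : List Int) (shift_right : Int) : List Int :=
  let array_size : Int := array.length
  let new_array : List Int :=
    (PySem.List.pyRange 0 array_size 1).foldl (fun na _ => na ++ [(0 : Int)]) []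
  -- index assignment new_array[ci] = array[i]; ci = (i+shift) % size is nonnegative (Python %)
  (PySem.List.pyRange 0 array_size 1).foldl
    (fun na i =>
      na.set ((PySem.Int.mod (i + shift_right) array_size).toNat) (PySem.List.pyGetD array i 0))
    new_array

def generate_root_alter (fifths_transpose : Int) : List Int :=
  let root_alter : List Int := [0, 0, 0, 0, 0, 0, 0]
  let root_alter : List Int :=
    if fifths_transpose > 0 then
      (PySem.List.pyRange 0 fifths_transpose 1).foldl
        (fun ra sharp_number => ra.set ((PySem.Int.mod (sharp_number * 4 + 3) 7).toNat) 1)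
        root_alter
    else root_alter
  let root_alter : List Int :=
    if fifths_transpose < 0 then
      (PySem.List.pyRange 0 (fifths_transpose * -1) 1).foldl
        (fun ra flat_number => ra.set ((PySem.Int.mod (flat_number * 3 + 6) 7).toNat) (-1))
        root_alter
    else root_alter
  array_rotate root_alter (PySem.Int.mod (fifths_transpose * -4) 7)

-- ===== PORT B =====
def generate_root_alter_alt (fifths_transpose : Int) : List Int :=
  let result : List Int := [0, 0, 0, 0, 0, 0, 0]
  let result : List Int :=
    if fifths_transpose > 0 then
      (PySem.List.pyRange 0 fifths_transpose 1).foldl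
        (fun r k => r.set ((PySem.Int.mod (k * 3 + 6) 7).toNat) 1)
        result
    else result
  if fifths_transpose < 0 then
    (PySem.List.pyRange 0 (-fifths_transpose) 1).foldl
      (fun r k => r.set ((PySem.Int.mod (k * 4 + 3) 7).toNat) (-1))
      result
  else result

-- ===== PRECONDITION & SPEC =====
def Spec_generate_root_alter (fifths_transpose : Int) (out : List Int) : Prop := out = generate_root_alter_alt fifths_transpose
instance (fifths_transpose : Int) (out : List Int) : Decidable (Spec_generate_root_alter fifths_transpose out) := by unfold Spec_generate_root_alter; infer_instance

-- ===== CLAIM (what is proved, stated in full; the proofs are below) =====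
def Claim_equal_generate_root_alter : Prop := ∀ (fifths_transpose : Int), Dom_generate_root_alter fifths_transpose → Spec_generate_root_alter fifths_transpose (generate_root_alter fifths_transpose)

-- ===== LEMMAS AND PROOFS =====

-- setting any index of the all-ones (all-minus-ones) 7-list to 1 (-1) leaves it unchanged
theorem set_ones (i : Nat) : ([1, 1, 1, 1, 1, 1, 1] : List Int).set i 1 = [1, 1, 1, 1, 1, 1, 1] := by
  rcases i with _|_|_|_|_|_|_|i <;> rfl

theorem set_mones (i : Nat) : ([-1, -1, -1, -1, -1, -1, -1] : List Int).set i (-1) = [-1, -1, -1, -1, -1, -1, -1] := by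
  rcases i with _|_|_|_|_|_|_|i <;> rfl

theorem foldl_set_ones (g : Int → Nat) (l : List Int) :
    l.foldl (fun r k => r.set (g k) (1 : Int)) [1, 1, 1, 1, 1, 1, 1] = [1, 1, 1, 1, 1, 1, 1] := by
  induction l with
  | nil => rfl
  | cons x xs ih => simpa [set_ones] using ih

theorem foldl_set_mones (g : Int → Nat) (l : List Int) :
    l.foldl (fun r k => r.set (g k) (-1 : Int)) [-1, -1, -1, -1, -1, -1, -1] = [-1, -1, -1, -1, -1, -1, -1] := by
  induction l with
  | nil => rfl
  | cons x xs ih => simpa [set_mones] using ih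

theorem rotate_ones (s : Int) (h0 : 0 ≤ s) (h7 : s < 7) :
    array_rotate [1, 1, 1, 1, 1, 1, 1] s = [1, 1, 1, 1, 1, 1, 1] := by
  interval_cases s <;> decide

theorem rotate_mones (s : Int) (h0 : 0 ≤ s) (h7 : s < 7) :
    array_rotate [-1, -1, -1, -1, -1, -1, -1] s = [-1, -1, -1, -1, -1, -1, -1] := by
  interval_cases s <;> decide

theorem mod7_nonneg (a : Int) : 0 ≤ PySem.Int.mod a 7 := by
  rw [PySem.Int.mod_eq_emod_of_pos (b := 7) (by norm_num)]
  exact Int.emod_nonneg a (by norm_num)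

theorem mod7_lt (a : Int) : PySem.Int.mod a 7 < 7 := by
  rw [PySem.Int.mod_eq_emod_of_pos (b := 7) (by norm_num)]
  exact Int.emod_lt_of_pos a (by norm_num)

theorem A_big (n : Int) (h : 7 ≤ n) : generate_root_alter n = [1, 1, 1, 1, 1, 1, 1] := by
  simp only [generate_root_alter]
  rw [if_pos (by omega : n > 0), if_neg (by omega : ¬ n < 0),
      PySem.List.pyRange_one_append 0 7 n (by omega) (by omega), List.foldl_append]
  have hpre :
      (PySem.List.pyRange 0 7 1).foldl
        (fun ra sharp_number => ra.set ((PySem.Int.mod (sharp_number * 4 + 3) 7).toNat) 1)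
        ([0, 0, 0, 0, 0, 0, 0] : List Int) = [1, 1, 1, 1, 1, 1, 1] := by decide
  simp only [hpre, foldl_set_ones]
  exact rotate_ones _ (mod7_nonneg _) (mod7_lt _)

theorem B_big (n : Int) (h : 7 ≤ n) : generate_root_alter_alt n = [1, 1, 1, 1, 1, 1, 1] := by
  simp only [generate_root_alter_alt]
  rw [if_pos (by omega : n > 0), if_neg (by omega : ¬ n < 0),
      PySem.List.pyRange_one_append 0 7 n (by omega) (by omega), List.foldl_append]
  have hpre :
      (PySem.List.pyRange 0 7 1).foldl
        (fun r k => r.set ((PySem.Int.mod (k * 3 + 6) 7).toNat) 1)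
        ([0, 0, 0, 0, 0, 0, 0] : List Int) = [1, 1, 1, 1, 1, 1, 1] := by decide
  simp only [hpre, foldl_set_ones]

theorem A_neg_big (n : Int) (h : n ≤ -7) : generate_root_alter n = [-1, -1, -1, -1, -1, -1, -1] := by
  simp only [generate_root_alter]
  rw [if_neg (by omega : ¬ n > 0), if_pos (by omega : n < 0),
      PySem.List.pyRange_one_append 0 7 (n * -1) (by omega) (by omega), List.foldl_append]
  have hpre :
      (PySem.List.pyRange 0 7 1).foldl
        (fun ra flat_number => ra.set ((PySem.Int.mod (flat_number * 3 + 6) 7).toNat) (-1))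
        ([0, 0, 0, 0, 0, 0, 0] : List Int) = [-1, -1, -1, -1, -1, -1, -1] := by decide
  simp only [hpre, foldl_set_mones]
  exact rotate_mones _ (mod7_nonneg _) (mod7_lt _)

theorem B_neg_big (n : Int) (h : n ≤ -7) : generate_root_alter_alt n = [-1, -1, -1, -1, -1, -1, -1] := by
  simp only [generate_root_alter_alt]
  rw [if_neg (by omega : ¬ n > 0), if_pos (by omega : n < 0),
      PySem.List.pyRange_one_append 0 7 (-n) (by omega) (by omega), List.foldl_append]
  have hpre :
      (PySem.List.pyRange 0 7 1).foldl
        (fun r k => r.set ((PySem.Int.mod (k * 4 + 3) 7).toNat) (-1))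
        ([0, 0, 0, 0, 0, 0, 0] : List Int) = [-1, -1, -1, -1, -1, -1, -1] := by decide
  simp only [hpre, foldl_set_mones]

-- ===== VERDICT (by name: the statement is the Claim_ definition above) =====
theorem generate_root_alter_spec : Claim_equal_generate_root_alter := by
  intro n _
  unfold Spec_generate_root_alter
  by_cases h1 : 7 ≤ n
  · rw [A_big n h1, B_big n h1]
  · by_cases h2 : n ≤ -7
    · rw [A_neg_big n h2, B_neg_big n h2]
    · have hl : -6 ≤ n := by omega
      have hr : n ≤ 6 := by omega
      interval_cases n <;> decide
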